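-- pv_equiv track=rewrite | github.com/UYasher/CIS530 | PS2/hw2_skeleton.py | rare_members
-- ===== SOURCE A (Python) =====
-- def rare_members(words):
--     rare_outputs = [0 for _ in words]
--     rare_chars = ['j', 'q', 'x', 'z']
--     for idx, word in enumerate(words):
--         for char in word:
--             if char in rare_chars:
--                 rare_outputs[idx] += 1
--     return rare_outputs
-- ===== SOURCE B (Python) =====
-- def rare_members(words):
--     return [sum(word.count(c) for c in 'jqxz') for word in words]
-- ===== Notes on version B (the rewrite author's own statement) =====
-- stated objective: idiomatic
-- what changed: Replaces the index-mutating per-character membership scan with a comprehension that, per word, sums str.count over the four rare letters.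
import Mathlib
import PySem

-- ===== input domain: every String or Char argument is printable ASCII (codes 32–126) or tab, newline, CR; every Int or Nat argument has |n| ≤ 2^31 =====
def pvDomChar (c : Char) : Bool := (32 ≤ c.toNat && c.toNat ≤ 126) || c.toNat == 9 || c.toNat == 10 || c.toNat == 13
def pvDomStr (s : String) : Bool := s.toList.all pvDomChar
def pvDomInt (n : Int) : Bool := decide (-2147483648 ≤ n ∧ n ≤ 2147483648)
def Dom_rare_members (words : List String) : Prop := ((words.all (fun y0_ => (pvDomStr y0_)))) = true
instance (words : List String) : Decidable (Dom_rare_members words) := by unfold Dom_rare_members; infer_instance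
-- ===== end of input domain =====

-- B replaces A's index-mutating per-character membership scan with a per-word sum of str.count over the four rare letters (idiomatic; same cost).


-- ===== PORT A =====
-- 'for char in word: if char in rare_chars: rare_outputs[idx] += 1'
def rareInnerA (idx : Int) (outs : List Int) (word : String) : List Int :=
  word.toList.foldl
    (fun o char =>
      if ['j', 'q', 'x', 'z'].contains char then
        PySem.List.pySetD o idx (PySem.List.pyGetD o idx 0 + 1)
      else o)
    outs

def rare_members (words : List String) : List Int :=
  let rare_outputs := words.map (fun _ => (0 : Int))
  (PySem.List.enumerate words).foldl
    (fun outs p => rareInnerA p.1 outs p.2) rare_outputs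

-- ===== PORT B =====
def rare_members_alt (words : List String) : List Int :=
  words.map (fun word =>
    ("jqxz".toList.map (fun c => (PySem.Str.count word (String.ofList [c]) : Int))).sum)

-- ===== PRECONDITION & SPEC =====
def Spec_rare_members (words : List String) (out : List Int) : Prop := out = rare_members_alt words
instance (words : List String) (out : List Int) : Decidable (Spec_rare_members words out) := by unfold Spec_rare_members; infer_instance

-- ===== CLAIM (what is proved, stated in full; the proofs are below) =====
def Claim_equal_rare_members : Prop := ∀ (words : List String), Dom_rare_members words → Spec_rare_members words (rare_members words)

-- ===== LEMMAS AND PROOFS =====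

-- str.count with a single-character needle is the character count
theorem pv_go_single (c : Char) (cs : List Char) : ∀ (fuel acc : ℕ), cs.length ≤ fuel →
    PySem.Chars.count.go [c] fuel cs acc = acc + cs.count c := by
  induction cs with
  | nil => intro fuel acc h; cases fuel <;> simp [PySem.Chars.count.go]
  | cons x t ih =>
    intro fuel acc h
    cases fuel with
    | zero => simp at h
    | succ n =>
      simp only [PySem.Chars.count.go]
      by_cases hc : c = x
      · subst hc
        simp [List.isPrefixOf, ih n (acc + 1) (by simpa using h)]
        omega
      · simp [List.isPrefixOf, hc, ih n acc (by simpa using h), Ne.symm hc]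

theorem pv_count_single (c : Char) (cs : List Char) : PySem.Chars.count cs [c] = cs.count c := by
  simp [PySem.Chars.count, pv_go_single c cs cs.length 0 le_rfl]

-- B's per-word value, on the char-list side
def pvWordB (cs : List Char) : Int :=
  (cs.count 'j' : Int) + cs.count 'q' + cs.count 'x' + cs.count 'z'

theorem pv_alt_word (w : String) :
    ("jqxz".toList.map (fun c => (PySem.Str.count w (String.ofList [c]) : Int))).sum
      = pvWordB w.toList := by
  show ((['j','q','x','z'] : List Char).map _).sum = _
  simp [PySem.Str.count, pv_count_single, pvWordB]
  ring

-- A's membership count equals the sum of the four char counts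
theorem pv_countP_eq (cs : List Char) :
    (cs.countP (fun c => ['j','q','x','z'].contains c) : Int) = pvWordB cs := by
  induction cs with
  | nil => simp [pvWordB]
  | cons x t ih =>
    simp only [List.countP_cons, List.count_cons, pvWordB] at *
    by_cases h1 : x = 'j' <;> by_cases h2 : x = 'q' <;> by_cases h3 : x = 'x' <;>
      by_cases h4 : x = 'z' <;>
      simp_all <;> omega

-- A's inner loop only updates position n, adding the membership count
theorem pv_inner_eq (n : ℕ) (cs : List Char) : ∀ (outs : List Int), n < outs.length →
    cs.foldl
      (fun o char =>
        if ['j', 'q', 'x', 'z'].contains char then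
          PySem.List.pySetD o (n : Int) (PySem.List.pyGetD o (n : Int) 0 + 1)
        else o) outs
    = outs.set n (outs.getD n 0 + cs.countP (fun c => ['j','q','x','z'].contains c)) := by
  induction cs with
  | nil =>
    intro outs h
    simp [List.getD, List.getElem?_eq_getElem h, List.set_getElem_self h]
  | cons x t ih =>
    intro outs h
    by_cases hx : (['j','q','x','z'] : List Char).contains x
    · simp only [List.foldl_cons, hx, if_pos]
      rw [PySem.List.pySetD_natCast, PySem.List.pyGetD_natCast,
          ih (outs.set n (outs.getD n 0 + 1)) (by rw [List.length_set]; exact h)]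
      rw [List.set_set]
      simp [List.getD, List.getElem?_eq_getElem h,
        (by simpa using hx : x = 'j' ∨ x = 'q' ∨ x = 'x' ∨ x = 'z'), List.getElem?_set_self h]
      congr 1
      ring
    · simp only [List.foldl_cons, hx, if_neg, Bool.false_eq_true, not_false_iff]
      rw [ih outs h]
      have hx' : ¬(x = 'j' ∨ x = 'q' ∨ x = 'x' ∨ x = 'z') := by simpa using hx
      simp [hx']

-- outer loop: folding over enumerate from |pre| maps each word independently
theorem pv_outer (ws : List String) : ∀ (pre : List Int),
    (PySem.List.enumerate ws (pre.length : Int)).foldl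
      (fun outs p => rareInnerA p.1 outs p.2) (pre ++ ws.map (fun _ => (0 : Int)))
    = pre ++ ws.map (fun w => pvWordB w.toList) := by
  induction ws with
  | nil => intro pre; simp [PySem.List.enumerate]
  | cons w ws ih =>
    intro pre
    rw [PySem.List.enumerate_cons]
    simp only [List.foldl_cons]
    have h1 : rareInnerA (pre.length : Int) (pre ++ (w :: ws).map (fun _ => (0 : Int))) w
        = (pre ++ [pvWordB w.toList]) ++ ws.map (fun _ => (0 : Int)) := by
      unfold rareInnerA
      rw [pv_inner_eq pre.length w.toList _ (by simp)]
      have hz : (w :: ws).map (fun _ => (0 : Int)) = 0 :: ws.map (fun _ => (0 : Int)) := rfl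
      rw [hz, List.set_append_right _ _ le_rfl]
      have hc := pv_countP_eq w.toList
      simp [pvWordB] at hc
      simp [List.getD, pvWordB, hc]
    rw [h1]
    have h2 : ((pre.length : Int) + 1) = (((pre ++ [pvWordB w.toList]).length : ℕ) : Int) := by
      simp
    rw [h2, ih (pre ++ [pvWordB w.toList])]
    simp

-- ===== VERDICT (by name: the statement is the Claim_ definition above) =====
theorem rare_members_spec : Claim_equal_rare_members := by
  intro words _
  show rare_members words = rare_members_alt words
  unfold rare_members rare_members_alt
  have := pv_outer words []
  simp only [List.length_nil, Nat.cast_zero, List.nil_append] at this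
  rw [this]
  exact List.map_congr_left (fun w _ => pv_alt_word w) |>.symm ▸ rfl
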